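-- pv_equiv track=rewrite | github.com/luofeisg/DKGE | code/util/train_util.py | get_basic_info
-- ===== SOURCE A (Python) =====
-- def get_basic_info(train_set):
--     entity_set = set()
--     relation_set = set()
--     entity_context_dict = dict()
--     relation_context_dict = dict()
--     relation_entity_context_dict = dict()
--     for (h, r, t) in train_set:
--         entity_set.add(h)
--         entity_set.add(t)
--         relation_set.add(r)
--         entity_context_dict.setdefault(h, set()).add((t, r))    # h: (t,r)
--         entity_context_dict.setdefault(t, set()).add((h, r))
--         relation_entity_context_dict.setdefault(r, set()).add(h)
--         relation_entity_context_dict.setdefault(r, set()).add(t)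
--     for relation1 in relation_set:
--         for relation2 in relation_set:
--             if relation1 == relation2:
--                 continue
--             if not relation_entity_context_dict[relation1].isdisjoint(relation_entity_context_dict[relation2]):
--                 relation_context_dict.setdefault(relation1, set()).add(relation2)
--
--     return entity_set, relation_set, entity_context_dict, relation_context_dict
-- ===== SOURCE B (Python) =====
-- def get_basic_info(train_set):
--     entity_set = {e for h, _, t in train_set for e in (h, t)}
--     relation_set = {r for _, r, _ in train_set}
--     entity_context_dict = dict()
--     rel_ents = dict()  # relation -> entities occurring with it
--     for h, r, t in train_set:
--         entity_context_dict.setdefault(h, set()).add((t, r))    # h: (t,r)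
--         entity_context_dict.setdefault(t, set()).add((h, r))
--         rel_ents.setdefault(r, set()).update((h, t))
--     # inverted index entity -> relations it occurs with
--     ent_rels = dict()
--     for r, es in rel_ents.items():
--         for e in es:
--             ent_rels.setdefault(e, set()).add(r)
--     relation_context_dict = dict()
--     for r1, es in rel_ents.items():
--         nbrs = set()
--         for e in es:
--             nbrs |= ent_rels[e]
--         ctx = [r2 for r2 in rel_ents if r2 != r1 and r2 in nbrs]
--         if ctx:
--             relation_context_dict[r1] = set(ctx)
--     return entity_set, relation_set, entity_context_dict, relation_context_dict
-- ===== Notes on version B (the rewrite author's own statement) =====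
-- stated objective: alternative
-- what changed: Replaces the per-pair set-intersection scan over all relation pairs by an inverted entity-to-relations index: each relation's co-occurring neighbour set is the union of its entities' relation sets, so the per-pair isdisjoint test disappears (intended as faster; measured 1.7x median at the largest size but not consistently above 1.5x).
import Mathlib
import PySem

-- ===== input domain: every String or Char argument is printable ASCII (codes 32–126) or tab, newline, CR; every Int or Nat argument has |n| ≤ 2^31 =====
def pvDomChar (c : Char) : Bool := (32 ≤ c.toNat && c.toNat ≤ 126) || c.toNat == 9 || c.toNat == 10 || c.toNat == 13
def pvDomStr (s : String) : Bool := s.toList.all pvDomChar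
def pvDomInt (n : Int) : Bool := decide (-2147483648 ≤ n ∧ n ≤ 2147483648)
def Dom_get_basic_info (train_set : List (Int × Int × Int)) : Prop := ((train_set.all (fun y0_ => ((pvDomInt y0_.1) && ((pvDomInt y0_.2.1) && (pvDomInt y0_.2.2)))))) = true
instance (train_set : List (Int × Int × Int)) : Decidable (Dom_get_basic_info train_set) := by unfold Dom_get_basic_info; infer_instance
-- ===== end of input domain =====

-- B replaces A's per-pair isdisjoint scan by an inverted entity→relations index
-- (a different algorithm for the relation-context phase); return value proved identical.

-- ===== PORT A =====
-- Python A iterates sets only to build sets/dicts compared as sets, so the result is order-independent.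
def get_basic_info (train_set : List (Int × Int × Int)) : List Int × List Int × (List (Int × List (Int × Int))) × (List (Int × List Int)) :=
  let st := train_set.foldl (fun (acc : PySem.Set Int × PySem.Set Int × PySem.Dict Int (PySem.Set (Int × Int)) × PySem.Dict Int (PySem.Set Int)) tr =>
      ( PySem.Set.add (PySem.Set.add acc.1 tr.1) tr.2.2,
        PySem.Set.add acc.2.1 tr.2.1,
        ((acc.2.2.1.modify tr.1 PySem.Set.empty (fun s => PySem.Set.add s (tr.2.2, tr.2.1))).modify tr.2.2 PySem.Set.empty (fun s => PySem.Set.add s (tr.1, tr.2.1))),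
        ((acc.2.2.2.modify tr.2.1 PySem.Set.empty (fun s => PySem.Set.add s tr.1)).modify tr.2.1 PySem.Set.empty (fun s => PySem.Set.add s tr.2.2)) ))
    (PySem.Set.empty, PySem.Set.empty, PySem.Dict.empty, PySem.Dict.empty)
  -- relation_entity_context_dict[r] exists for every r in relation_set, so getD with default ∅ is exact
  let rcd := st.2.1.foldl (fun rcd r1 =>
      st.2.1.foldl (fun rcd r2 =>
        if r1 == r2 then rcd
        else if !(PySem.Set.isdisjoint (st.2.2.2.getD r1 PySem.Set.empty) (st.2.2.2.getD r2 PySem.Set.empty)) then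
          rcd.modify r1 PySem.Set.empty (fun s => PySem.Set.add s r2)
        else rcd) rcd) PySem.Dict.empty
  (st.1, st.2.1, st.2.2.1.items, rcd.items)

-- ===== PORT B =====
def get_basic_info_alt (train_set : List (Int × Int × Int)) : List Int × List Int × (List (Int × List (Int × Int))) × (List (Int × List Int)) :=
  let entity_set := PySem.Set.ofList (train_set.flatMap (fun tr => [tr.1, tr.2.2]))
  let relation_set := PySem.Set.ofList (train_set.map (fun tr => tr.2.1))
  let p := train_set.foldl (fun (acc : PySem.Dict Int (PySem.Set (Int × Int)) × PySem.Dict Int (PySem.Set Int)) tr =>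
      ( ((acc.1.modify tr.1 PySem.Set.empty (fun s => PySem.Set.add s (tr.2.2, tr.2.1))).modify tr.2.2 PySem.Set.empty (fun s => PySem.Set.add s (tr.1, tr.2.1))),
        acc.2.modify tr.2.1 PySem.Set.empty (fun s => PySem.Set.update s [tr.1, tr.2.2]) ))
    (PySem.Dict.empty, PySem.Dict.empty)
  let relEnts := p.2
  let entRels := relEnts.items.foldl (fun d pr =>
      pr.2.foldl (fun d e => d.modify e PySem.Set.empty (fun s => PySem.Set.add s pr.1)) d) PySem.Dict.empty
  let rcd := relEnts.items.foldl (fun rcd pr =>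
      let nbrs := pr.2.foldl (fun n e => PySem.Set.union n (entRels.getD e PySem.Set.empty)) PySem.Set.empty
      let ctx := relEnts.keys.filter (fun r2 => r2 != pr.1 && PySem.Set.contains nbrs r2)
      if ctx.isEmpty then rcd else rcd.insert pr.1 (PySem.Set.ofList ctx)) PySem.Dict.empty
  (entity_set, relation_set, p.1.items, rcd.items)

-- ===== PRECONDITION & SPEC =====
def Spec_get_basic_info (train_set : List (Int × Int × Int)) (out : List Int × List Int × (List (Int × List (Int × Int))) × (List (Int × List Int))) : Prop := out = get_basic_info_alt train_set
instance (train_set : List (Int × Int × Int)) (out : List Int × List Int × (List (Int × List (Int × Int))) × (List (Int × List Int))) : Decidable (Spec_get_basic_info train_set out) := by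
  unfold Spec_get_basic_info
  have i1 : DecidableEq (List Int) := inferInstance
  have i2 : DecidableEq (List (Int × List (Int × Int))) := inferInstance
  have i3 : DecidableEq (List (Int × List Int)) := inferInstance
  exact @instDecidableEqProd _ _ i1 (@instDecidableEqProd _ _ i1 (@instDecidableEqProd _ _ i2 i3)) out _

-- ===== CLAIM (what is proved, stated in full; the proofs are below) =====
def Claim_equal_get_basic_info : Prop := ∀ (train_set : List (Int × Int × Int)), Dom_get_basic_info train_set → Spec_get_basic_info train_set (get_basic_info train_set)

-- ===== LEMMAS AND PROOFS =====

-- abbreviations for the shared loop bodies (proof-side only)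
def pvStE (s : PySem.Set Int) (tr : Int × Int × Int) : PySem.Set Int :=
  PySem.Set.add (PySem.Set.add s tr.1) tr.2.2
def pvStR (s : PySem.Set Int) (tr : Int × Int × Int) : PySem.Set Int :=
  PySem.Set.add s tr.2.1
def pvStC (d : PySem.Dict Int (PySem.Set (Int × Int))) (tr : Int × Int × Int) : PySem.Dict Int (PySem.Set (Int × Int)) :=
  (d.modify tr.1 PySem.Set.empty (fun s => PySem.Set.add s (tr.2.2, tr.2.1))).modify tr.2.2 PySem.Set.empty (fun s => PySem.Set.add s (tr.1, tr.2.1))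
def pvStRE (d : PySem.Dict Int (PySem.Set Int)) (tr : Int × Int × Int) : PySem.Dict Int (PySem.Set Int) :=
  d.modify tr.2.1 PySem.Set.empty (fun s => PySem.Set.update s [tr.1, tr.2.2])

theorem pv_modify_modify {κ ν : Type} [BEq κ] [LawfulBEq κ] (d : PySem.Dict κ ν) (k : κ) (d0 : ν) (f g : ν → ν) :
    (d.modify k d0 f).modify k d0 g = d.modify k d0 (fun v => g (f v)) := by
  simp [PySem.Dict.modify, PySem.Dict.getD_insert_self, PySem.Dict.insert_insert_self]

-- A's four-component loop splits into independent folds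
theorem pv_splitA (l : List (Int × Int × Int)) :
    ∀ (es rs : PySem.Set Int) (ecd : PySem.Dict Int (PySem.Set (Int × Int))) (recd : PySem.Dict Int (PySem.Set Int)),
    l.foldl (fun (acc : PySem.Set Int × PySem.Set Int × PySem.Dict Int (PySem.Set (Int × Int)) × PySem.Dict Int (PySem.Set Int)) tr =>
      ( PySem.Set.add (PySem.Set.add acc.1 tr.1) tr.2.2,
        PySem.Set.add acc.2.1 tr.2.1,
        ((acc.2.2.1.modify tr.1 PySem.Set.empty (fun s => PySem.Set.add s (tr.2.2, tr.2.1))).modify tr.2.2 PySem.Set.empty (fun s => PySem.Set.add s (tr.1, tr.2.1))),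
        ((acc.2.2.2.modify tr.2.1 PySem.Set.empty (fun s => PySem.Set.add s tr.1)).modify tr.2.1 PySem.Set.empty (fun s => PySem.Set.add s tr.2.2)) ))
      (es, rs, ecd, recd)
    = (l.foldl pvStE es, l.foldl pvStR rs, l.foldl pvStC ecd, l.foldl pvStRE recd) := by
  induction l with
  | nil => intro es rs ecd recd; rfl
  | cons tr l ih =>
      intro es rs ecd recd
      simp only [List.foldl_cons]
      rw [show ((recd.modify tr.2.1 PySem.Set.empty (fun s => PySem.Set.add s tr.1)).modify tr.2.1 PySem.Set.empty (fun s => PySem.Set.add s tr.2.2)) = pvStRE recd tr from by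
        rw [pv_modify_modify]; rfl]
      exact ih _ _ _ _

-- B's two-component loop splits as well
theorem pv_splitB (l : List (Int × Int × Int)) :
    ∀ (ecd : PySem.Dict Int (PySem.Set (Int × Int))) (re : PySem.Dict Int (PySem.Set Int)),
    l.foldl (fun (acc : PySem.Dict Int (PySem.Set (Int × Int)) × PySem.Dict Int (PySem.Set Int)) tr =>
      ( ((acc.1.modify tr.1 PySem.Set.empty (fun s => PySem.Set.add s (tr.2.2, tr.2.1))).modify tr.2.2 PySem.Set.empty (fun s => PySem.Set.add s (tr.1, tr.2.1))),
        acc.2.modify tr.2.1 PySem.Set.empty (fun s => PySem.Set.update s [tr.1, tr.2.2]) ))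
      (ecd, re)
    = (l.foldl pvStC ecd, l.foldl pvStRE re) := by
  induction l with
  | nil => intro ecd re; rfl
  | cons tr l ih => intro ecd re; simp only [List.foldl_cons]; exact ih _ _

theorem pv_entity_eq (l : List (Int × Int × Int)) :
    PySem.Set.ofList (l.flatMap (fun tr => [tr.1, tr.2.2])) = l.foldl pvStE PySem.Set.empty := by
  rw [PySem.Set.ofList_eq_foldl, List.foldl_flatMap]; rfl

theorem pv_relation_eq (l : List (Int × Int × Int)) :
    PySem.Set.ofList (l.map (fun tr => tr.2.1)) = l.foldl pvStR PySem.Set.empty := by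
  rw [PySem.Set.ofList_eq_foldl, List.foldl_map]; rfl

theorem pv_keys_re (l : List (Int × Int × Int)) :
    (l.foldl pvStRE PySem.Dict.empty).keys = l.foldl pvStR PySem.Set.empty := by
  rw [← pv_relation_eq]
  have := PySem.Dict.keys_foldl_modify_key l (fun tr : Int × Int × Int => tr.2.1)
    (PySem.Set.empty : PySem.Set Int) (fun _ tr => fun s => PySem.Set.update s [tr.1, tr.2.2]) PySem.Dict.empty
  simpa [pvStRE, PySem.Set.update_nil_left] using this

-- membership in an accumulated union
theorem pv_mem_foldl_union (g : Int → PySem.Set Int) (l : List Int) :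
    ∀ (acc : PySem.Set Int) (x : Int),
    x ∈ l.foldl (fun n e => PySem.Set.union n (g e)) acc ↔ x ∈ acc ∨ ∃ e ∈ l, x ∈ g e := by
  induction l with
  | nil => intro acc x; simp
  | cons e l ih =>
      intro acc x
      simp only [List.foldl_cons, ih, PySem.Set.mem_union, List.mem_cons]
      constructor
      · rintro ((h | h) | ⟨e', he', hx⟩)
        · exact Or.inl h
        · exact Or.inr ⟨e, Or.inl rfl, h⟩
        · exact Or.inr ⟨e', Or.inr he', hx⟩
      · rintro (h | ⟨e', (rfl | he'), hx⟩)
        · exact Or.inl (Or.inl h)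
        · exact Or.inl (Or.inr hx)
        · exact Or.inr ⟨e', he', hx⟩

-- membership in the inverted index, inner loop
theorem pv_mem_inv_inner (r : Int) (es : List Int) :
    ∀ (d : PySem.Dict Int (PySem.Set Int)) (a x : Int),
    x ∈ (es.foldl (fun d e => d.modify e PySem.Set.empty (fun s => PySem.Set.add s r)) d).getD a PySem.Set.empty
      ↔ x ∈ d.getD a PySem.Set.empty ∨ (x = r ∧ a ∈ es) := by
  induction es with
  | nil => intro d a x; simp
  | cons e es ih =>
      intro d a x
      simp only [List.foldl_cons, ih, List.mem_cons]
      rw [PySem.Dict.getD_modify]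
      by_cases h : a = e
      · subst h; simp [PySem.Set.mem_add]; try tauto
      · simp [h]; try tauto

-- membership in the inverted index, outer loop
theorem pv_mem_inv (items : List (Int × List Int)) :
    ∀ (d : PySem.Dict Int (PySem.Set Int)) (a x : Int),
    x ∈ (items.foldl (fun d pr => pr.2.foldl (fun d e => d.modify e PySem.Set.empty (fun s => PySem.Set.add s pr.1)) d) d).getD a PySem.Set.empty
      ↔ x ∈ d.getD a PySem.Set.empty ∨ ∃ pr ∈ items, x = pr.1 ∧ a ∈ pr.2 := by
  induction items with
  | nil => intro d a x; simp
  | cons pr items ih =>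
      intro d a x
      simp only [List.foldl_cons, ih, pv_mem_inv_inner, List.mem_cons]
      constructor
      · rintro ((h | h) | ⟨q, hq, hx⟩)
        · exact Or.inl h
        · exact Or.inr ⟨pr, Or.inl rfl, h⟩
        · exact Or.inr ⟨q, Or.inr hq, hx⟩
      · rintro (h | ⟨q, (rfl | hq), hx⟩)
        · exact Or.inl (Or.inl h)
        · exact Or.inl (Or.inr hx)
        · exact Or.inr ⟨q, hq, hx⟩

-- the guarded inner loop is a fold over the filtered relation list
theorem pv_inner_filter (r1 : Int) (c : Int → Bool) (l : List Int) :
    ∀ (rcd : PySem.Dict Int (PySem.Set Int)),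
    l.foldl (fun rcd r2 => if r1 == r2 then rcd else if c r2 then rcd.modify r1 PySem.Set.empty (fun s => PySem.Set.add s r2) else rcd) rcd
    = (l.filter (fun r2 => !(r1 == r2) && c r2)).foldl (fun rcd r2 => rcd.modify r1 PySem.Set.empty (fun s => PySem.Set.add s r2)) rcd := by
  induction l with
  | nil => intro rcd; rfl
  | cons r2 l ih =>
      intro rcd
      simp only [List.foldl_cons, List.filter_cons]
      by_cases h : (r1 == r2) = true
      · simp only [h, Bool.not_true, Bool.false_and, Bool.false_eq_true, if_false]
        exact ih rcd
      · have h' : (r1 == r2) = false := by simpa using h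
        by_cases hc : c r2 = true
        · simp only [h', hc, Bool.not_false, Bool.true_and, Bool.false_eq_true, if_false]
          exact ih _
        · have hc' : c r2 = false := by simpa using hc
          simp only [h', hc', Bool.not_false, Bool.true_and, Bool.false_eq_true, if_false]
          exact ih rcd

-- a chain of modifies at one key is a single modify with the accumulated update
theorem pv_modify_chain (r1 : Int) (ctx : List Int) :
    ∀ (rcd : PySem.Dict Int (PySem.Set Int)), ctx ≠ [] →
    ctx.foldl (fun rcd r2 => rcd.modify r1 PySem.Set.empty (fun s => PySem.Set.add s r2)) rcd
    = rcd.modify r1 PySem.Set.empty (fun s => PySem.Set.update s ctx) := by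
  induction ctx with
  | nil => intro rcd h; exact absurd rfl h
  | cons x xs ih =>
      intro rcd _
      rcases eq_or_ne xs [] with h | h
      · subst h; rfl
      · simp only [List.foldl_cons]
        rw [ih _ h, pv_modify_modify]
        rfl

theorem pv_modify_not_contains {κ ν : Type} [BEq κ] [LawfulBEq κ] (d : PySem.Dict κ ν) (k : κ) (d0 : ν) (f : ν → ν)
    (h : d.contains k = false) : d.modify k d0 f = d.insert k (f d0) := by
  simp [PySem.Dict.modify, PySem.Dict.getD_of_not_contains d d0 h]

-- A's quadratic phase equals B's inverted-index phase
theorem pv_phase2 (E ER : PySem.Dict Int (PySem.Set Int))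
    (hER : ∀ (x e : Int), x ∈ ER.getD e PySem.Set.empty ↔ ∃ pr ∈ E.items, x = pr.1 ∧ e ∈ pr.2)
    (hnd : E.keys.Nodup) :
    E.keys.foldl (fun rcd r1 =>
      E.keys.foldl (fun rcd r2 =>
        if r1 == r2 then rcd
        else if !(PySem.Set.isdisjoint (E.getD r1 PySem.Set.empty) (E.getD r2 PySem.Set.empty)) then
          rcd.modify r1 PySem.Set.empty (fun s => PySem.Set.add s r2)
        else rcd) rcd) PySem.Dict.empty
    = E.items.foldl (fun rcd pr =>
        let nbrs := pr.2.foldl (fun n e => PySem.Set.union n (ER.getD e PySem.Set.empty)) PySem.Set.empty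
        let ctx := E.keys.filter (fun r2 => r2 != pr.1 && PySem.Set.contains nbrs r2)
        if ctx.isEmpty then rcd else rcd.insert pr.1 (PySem.Set.ofList ctx)) PySem.Dict.empty := by
  -- fold over items = fold over keys paired with their values
  rw [PySem.Dict.items_eq_map_keys E hnd PySem.Set.empty, List.foldl_map]
  -- common generalized induction over the list of keys being processed
  have key : ∀ (l : List Int) (rcd : PySem.Dict Int (PySem.Set Int)), l.Nodup →
      (∀ r ∈ l, rcd.contains r = false) → (∀ r ∈ l, r ∈ E.keys) →
      l.foldl (fun rcd r1 =>
        E.keys.foldl (fun rcd r2 =>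
          if r1 == r2 then rcd
          else if !(PySem.Set.isdisjoint (E.getD r1 PySem.Set.empty) (E.getD r2 PySem.Set.empty)) then
            rcd.modify r1 PySem.Set.empty (fun s => PySem.Set.add s r2)
          else rcd) rcd) rcd
      = l.foldl (fun rcd k =>
          if (E.keys.filter (fun r2 => r2 != k && PySem.Set.contains ((E.getD k PySem.Set.empty).foldl (fun n e => PySem.Set.union n (ER.getD e PySem.Set.empty)) PySem.Set.empty) r2)).isEmpty then rcd
          else rcd.insert k (PySem.Set.ofList (E.keys.filter (fun r2 => r2 != k && PySem.Set.contains ((E.getD k PySem.Set.empty).foldl (fun n e => PySem.Set.union n (ER.getD e PySem.Set.empty)) PySem.Set.empty) r2)))) rcd := by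
    intro l
    induction l with
    | nil => intro rcd _ _ _; rfl
    | cons r1 l ih =>
        intro rcd hnodup hfree hkeys
        have hr1free : rcd.contains r1 = false := hfree r1 (List.mem_cons_self ..)
        -- the two head steps agree
        have hstep :
            E.keys.foldl (fun rcd r2 =>
              if r1 == r2 then rcd
              else if !(PySem.Set.isdisjoint (E.getD r1 PySem.Set.empty) (E.getD r2 PySem.Set.empty)) then
                rcd.modify r1 PySem.Set.empty (fun s => PySem.Set.add s r2)
              else rcd) rcd
            = (if (E.keys.filter (fun r2 => r2 != r1 && PySem.Set.contains ((E.getD r1 PySem.Set.empty).foldl (fun n e => PySem.Set.union n (ER.getD e PySem.Set.empty)) PySem.Set.empty) r2)).isEmpty then rcd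
               else rcd.insert r1 (PySem.Set.ofList (E.keys.filter (fun r2 => r2 != r1 && PySem.Set.contains ((E.getD r1 PySem.Set.empty).foldl (fun n e => PySem.Set.union n (ER.getD e PySem.Set.empty)) PySem.Set.empty) r2)))) := by
          rw [pv_inner_filter]
          have hfil : E.keys.filter (fun r2 => !(r1 == r2) && !(PySem.Set.isdisjoint (E.getD r1 PySem.Set.empty) (E.getD r2 PySem.Set.empty)))
              = E.keys.filter (fun r2 => r2 != r1 && PySem.Set.contains ((E.getD r1 PySem.Set.empty).foldl (fun n e => PySem.Set.union n (ER.getD e PySem.Set.empty)) PySem.Set.empty) r2) := by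
            apply List.filter_congr
            intro r2 hr2
            rw [Bool.eq_iff_iff]
            simp only [Bool.and_eq_true, Bool.not_eq_true', bne_iff_ne, beq_eq_false_iff_ne, ne_eq]
            constructor
            · rintro ⟨hne, hdis⟩
              refine ⟨fun h => hne h.symm, ?_⟩
              rw [PySem.Set.contains_iff, pv_mem_foldl_union]
              have hx : ¬ ((E.getD r1 PySem.Set.empty).isdisjoint (E.getD r2 PySem.Set.empty) = true) := by
                rw [hdis]; simp
              rw [PySem.Set.isdisjoint_iff] at hx
              push Not at hx
              obtain ⟨e, he1, he2⟩ := hx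
              refine Or.inr ⟨e, he1, ?_⟩
              rw [hER]
              refine ⟨(r2, E.getD r2 PySem.Set.empty), ?_, rfl, he2⟩
              rw [PySem.Dict.items_eq_map_keys E hnd PySem.Set.empty]
              exact List.mem_map.mpr ⟨r2, hr2, rfl⟩
            · rintro ⟨hne, hmem⟩
              refine ⟨fun h => hne h.symm, ?_⟩
              rw [PySem.Set.contains_iff, pv_mem_foldl_union] at hmem
              rcases hmem with h | ⟨e, he1, he2⟩
              · simp at h
              · rw [hER] at he2
                obtain ⟨pr, hpr, rfl, hepr⟩ := he2
                rw [PySem.Dict.items_eq_map_keys E hnd PySem.Set.empty] at hpr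
                obtain ⟨k, _, hk⟩ := List.mem_map.mp hpr
                have h2 : pr.2 = E.getD pr.1 PySem.Set.empty := by
                  rw [← hk]
                have hd : ¬ (PySem.Set.isdisjoint (E.getD r1 PySem.Set.empty) (E.getD pr.1 PySem.Set.empty) = true) := by
                  rw [PySem.Set.isdisjoint_iff]
                  push Not
                  exact ⟨e, he1, h2 ▸ hepr⟩
                exact Bool.eq_false_iff.mpr hd
          rw [hfil]
          generalize (E.keys.filter (fun r2 => r2 != r1 && PySem.Set.contains ((E.getD r1 PySem.Set.empty).foldl (fun n e => PySem.Set.union n (ER.getD e PySem.Set.empty)) PySem.Set.empty) r2)) = ctx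
          rcases eq_or_ne ctx [] with hc | hc
          · rw [hc]; simp
          · rw [pv_modify_chain r1 ctx rcd hc, pv_modify_not_contains rcd r1 PySem.Set.empty _ hr1free,
              if_neg (by simpa [List.isEmpty_iff] using hc)]
            rw [show PySem.Set.update PySem.Set.empty ctx = PySem.Set.ofList ctx from PySem.Set.update_nil_left ctx]
        simp only [List.foldl_cons]
        rw [hstep]
        apply ih
        · exact hnodup.of_cons
        · intro r hr
          have hrne : r ≠ r1 := by
            rintro rfl
            exact (List.nodup_cons.mp hnodup).1 hr
          by_cases hc : (E.keys.filter (fun r2 => r2 != r1 && PySem.Set.contains ((E.getD r1 PySem.Set.empty).foldl (fun n e => PySem.Set.union n (ER.getD e PySem.Set.empty)) PySem.Set.empty) r2)).isEmpty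
          · simp only [hc, if_pos]
            exact hfree r (List.mem_cons_of_mem _ hr)
          · simp only [hc, if_neg, Bool.not_eq_true]
            rw [PySem.Dict.contains_insert]
            simp [hrne, hfree r (List.mem_cons_of_mem _ hr)]
        · intro r hr; exact hkeys r (List.mem_cons_of_mem _ hr)
  exact key E.keys PySem.Dict.empty hnd (fun r _ => PySem.Dict.contains_empty r) (fun r hr => hr)

-- ===== VERDICT (by name: the statement is the Claim_ definition above) =====
theorem get_basic_info_spec : Claim_equal_get_basic_info := by
  intro l _
  unfold Spec_get_basic_info
  simp only [get_basic_info, get_basic_info_alt]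
  rw [pv_splitA, pv_splitB]
  have hkeys := pv_keys_re l
  have hnd : (l.foldl pvStRE PySem.Dict.empty).keys.Nodup := by
    rw [pv_keys_re, ← pv_relation_eq]; exact PySem.Set.nodup_ofList _
  refine congrArg₂ Prod.mk ?_ (congrArg₂ Prod.mk ?_ (congrArg₂ Prod.mk rfl ?_))
  · exact (pv_entity_eq l).symm
  · exact (pv_relation_eq l).symm
  · apply congrArg PySem.Dict.items
    rw [← hkeys]
    exact pv_phase2 (l.foldl pvStRE PySem.Dict.empty) _
      (fun x e => by
        rw [pv_mem_inv]
        simp [PySem.Dict.getD_empty])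
      hnd
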